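/- PORTED by tools/port_fixed.py from Prog/Jsmn/S/ParseOpen.lean to THE FIXED IMAGE fixed/jsmn_s.bin (same bytes at the same addresses; binFSc). Do not edit: edit the original and port again. -/
/-
  jsmn_s.bin, `jsmn_parse`: `case '{': case '[':` — `open_spec` (10033FH → 100486H | 100325H): count++; tokens == NULL → break;
  jsmn_alloc_token (by its contract); NULL → return JSMN_ERROR_NOMEM; toksuper != -1 → STRICT: tokens[toksuper].type == JSMN_OBJECT →
  return JSMN_ERROR_INVAL; tokens[toksuper].size++; token->parent = toksuper (`open_link`, Prog/Jsmn/S/ParseOpenLink.lean); then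
  `open_tail` (Prog/Jsmn/S/ParseOpenTail.lean). Here: 10033FH – 10035EH + the stub 1005DCH (11 instructions) and the composition.
  Model: `Jsmn.openBracket` with strict = parentLinks = true.
-/
import Prog.Jsmn.Fixed.Specs
import Prog.Jsmn.Fixed.CodeFS
import Prog.Jsmn.Fixed.S.ParseOpenLink
namespace X86
namespace J6
namespace FS
open X86.User (CodeAt RegsKept Span FlagsOK Layout toNat_add_ofNat toNat_ofNat_lt' add_ofNat_add)
open Jsmn JsmnFSBytes

set_option maxRecDepth 100000
set_option maxHeartbeats 4000000
set_option linter.unusedSimpArgs false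
set_option linter.unusedVariables false

variable {n : User.Layout}

theorem open_spec (sf : SafeFacts binFSc.cfg) (halloc : AllocSpec binFSc n) : OpenSpec n := by
  intro c v0 v s ch fuel hok hat hne
  rw [body_open _ _ _ _ _ hok]
  have hfr := hat.frame
  have hco := hfr.core
  have hen := hco.entry
  have hp := hen.pre
  have hinv := hfr.inv
  have himg := hco.image
  have hcode := hco.code
  have hfetch := hp.call.fetch
  have hat_rbx := hat.rbx (Or.inl rfl)
  v3_open hat.rip hco.rsp hco.rbp hco.r13 hco.ntok hfr.r12 hp.call
  clear hp_call_rip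
  j6f_bin
  v3_walk hcode hfetch [] until [0x100486, 0x100325]
  · -- tokens == NULL: only count++
    have hnone : s.toks = none := by
      cases hst : s.toks with
      | none => rfl
      | some ts =>
        have hta := hco.toksArg
        rw [hst] at hta
        exact absurd (show c.tb = 0 by v3_omega) hta.1
    have hb : openBracket Config.strictLinks ch c.numTokens s = .next { s with count := i32 (s.count + 1) } := by
      unfold openBracket; rw [hnone]
    have hpa := hco.parser
    have hta := hco.toksArg
    rw [hb]
    refine Reach.done ⟨by simp, A2.frame_next (fuel := fuel) sf hfr (by rw [body_open _ _ _ _ _ hok, hb]) (A2.core_step hco (by v3_regnorm) (by v3_regnorm) (by v3_regnorm)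
      (by v3_regnorm) (by v3_regnorm) (by v3_same) (by v3_memnorm; exact hpa) (by v3_memnorm; exact hta) Iff.rfl) (by v3_regnorm; exact A2.r12_inc _)⟩
  · -- there is a token array: call jsmn_alloc_token
    have hta := hco.toksArg
    obtain ⟨ts, hst⟩ : ∃ ts, s.toks = some ts := by
      cases hst : s.toks with
      | none => rw [hst] at hta; exact absurd hta (by intro h; rw [h] at hbr_100346; exact hbr_100346 rfl)
      | some ts => exact ⟨ts, rfl⟩
    rw [hst] at hta
    obtain ⟨htb0, htlen, htoks⟩ := hta
    have hpa := hco.parser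
    have hnum := hinv.numR
    have htinv := hinv.toks ts hst
    have henv := hp.env
    have htb : toksBytes binFSc.cfg c.numTokens c.toks0 = 20 * c.numTokens := by
      rw [← toksBytes_congr _ _ hco.null, hst]; rfl
    rw [htb] at henv
    have hR := henv.toksR.resolve_left htb0
    v3_open henv hR
    clear henv_toksR
    j6f_bin
    rw [Word.low32_ofNat_of_lt hnum]
    refine Reach.trans (halloc _ 0x10035b c.pa c.tb c.numTokens s.p ts
      ⟨by show CallPre n 0x100000 image_bytes 0x100040 0 _ _; v3_callpre himg hp.call, by v3_regnorm, by v3_regnorm, by v3_regnorm, hnum, by v3_frame hpa,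
        A2.toks_frame htoks htlen (by v3_memnorm; v3_eqon) (by v3_omega), htlen,
        A2.region_callee henv.parserR (by v3_regnorm) (by v3_omega) (Nat.zero_le _),
        A2.region_callee hR (by v3_regnorm) (by v3_omega) (Nat.zero_le _), henv.parserToks⟩) ?_
    intro v1 hpost
    obtain ⟨hpost1, hres⟩ := hpost
    v3_open hpost1
    have hk := hpost1.kept
    v3_viewnorm at hpost1_rsp hpost1_same hres
    j6f_bin
    unfold dataWins at hpost1_same
    have hcode1 : CodeAt v1.mem 0x1002a9 jsmn_parse_core_bytes := by v3_frame hcodeW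
    clear hcodeW
    cases hal : allocToken Config.strictLinks s.p ts c.numTokens with
    | none =>
      rw [hal] at hres
      obtain ⟨hrax, hmem1⟩ := hres
      v3_walk hcode1 hfetch [show ((233 : Nat) == 235) = false by decide, show ((233 : UInt8) == 235) = false by decide,
        show ((233 : UInt64) == 235) = false by decide] until [0x100486, 0x100325]
      have hb : openBracket Config.strictLinks ch c.numTokens s = .ret JSMN_ERROR_NOMEM { s with count := i32 (s.count + 1) } := by
        unfold openBracket; rw [hst]; simp only [hal]
      rw [hb]
      refine Reach.done ⟨by simp, A2.core_step hco (by v3_regnorm; rw [hpost1_rsp, hco_rsp]) (by v3_regnorm; rw [hk.get .rbp rfl]; v3_regnorm)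
        (by v3_regnorm; rw [hk.get .r15 rfl]; v3_regnorm) (by v3_regnorm; rw [hk.get .r14 rfl]; v3_regnorm) (by v3_regnorm; rw [hk.get .r13 rfl]; v3_regnorm)
        (by unfold dataWins PCtx.tlen; rw [htb]; v3_same) (by v3_memnorm; rw [hmem1]; v3_frame hpa) ?_ Iff.rfl, by v3_regnorm; decide⟩
      show ToksArg Config.strictLinks _ c.tb c.numTokens s.toks
      rw [hst]
      exact ⟨htb0, htlen, A2.toks_frame htoks htlen (by v3_memnorm; rw [hmem1]; v3_eqon) (by v3_omega)⟩
    | some r =>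
      obtain ⟨i, p', ts'⟩ := r
      rw [hal] at hres
      obtain ⟨hrax, hpa1, htoks1⟩ := hres
      obtain ⟨hi, hilt, hnext, hpos, hsup, hinv1⟩ := sf.alloc s.p ts c.numTokens i p' ts' (hst ▸ hinv) hal
      have hlen1 := (hinv1.toks ts' rfl).len
      rw [A2.tokAddr20] at hrax
      have hmuli := tokSize_mul_le Config.strictLinks (hlen1 ▸ hilt : i < ts'.length)
      rw [tokSize_strictLinks, hlen1] at hmuli
      have hb := openBracket_some (ch := ch) (nt := c.numTokens) hst hal
      v3_walk hcode1 hfetch [] until [0x100364, 0x100325]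
      rw [hb]
      refine Reach.mono (open_link (ch := ch) (i := i) (p' := p') (ts' := ts') (by simp)
        (A2.core_step hco (by v3_regnorm; rw [hpost1_rsp, hco_rsp]) (by v3_regnorm; rw [hk.get .rbp rfl]; v3_regnorm)
          (by v3_regnorm; rw [hk.get .r15 rfl]; v3_regnorm) (by v3_regnorm; rw [hk.get .r14 rfl]; v3_regnorm) (by v3_regnorm; rw [hk.get .r13 rfl]; v3_regnorm)
          (by unfold dataWins PCtx.tlen; rw [htb]; v3_same) (by v3_memnorm; exact hpa1) ⟨htb0, hlen1, by v3_memnorm; exact htoks1⟩ (by simp [hst]))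
        (by v3_regnorm; exact hrax) (by v3_regnorm; rw [hk.get .rbx rfl]; v3_regnorm; exact hat_rbx) hilt hinv1) ?_
      intro v' hend
      unfold OpenEnd at hend
      have hr12 : ∀ x : Word, v'.reg .r12 = x → x = v1.reg .r12 → v'.reg .r12 = UInt64.ofNat (u32 (i32 (s.count + 1))) := by
        intro x h1 h2
        rw [h1, h2, hk.get .r12 rfl]; v3_regnorm; exact A2.r12_inc _
      by_cases hm1 : p'.toksuper = -1
      · rw [if_pos hm1] at hend ⊢
        obtain ⟨hrip', hco', hr12'⟩ := hend
        exact ⟨hrip', A2.frame_next (fuel := fuel) sf hfr (by rw [body_open _ _ _ _ _ hok, hb, if_pos hm1]) hco' (hr12 _ hr12' (by v3_regnorm))⟩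
      · rw [if_neg hm1] at hend ⊢
        by_cases hobj : (tokAt ts' p'.toksuper).type = JSMN_OBJECT
        · rw [if_pos hobj] at hend ⊢
          exact hend
        · rw [if_neg hobj] at hend ⊢
          obtain ⟨hrip', hco', hr12'⟩ := hend
          exact ⟨hrip', A2.frame_next (fuel := fuel) sf hfr (by rw [body_open _ _ _ _ _ hok, hb, if_neg hm1, if_neg hobj]) hco'
            (hr12 _ hr12' (by v3_regnorm))⟩

end FS
end J6
end X86
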